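-- pv_equiv track=rewrite | github.com/SuperInstance/forgemaster | core/critical_angle.py | _nesting_probe
-- ===== SOURCE A (Python) =====
-- def _nesting_probe(depth, trial=0):
--     val = 3 + trial
--     expr = str(val)
--     ops = [("+", 2), ("*", 3), ("-", 1), ("+", 4), ("*", 2), ("-", 2), ("+", 3)]
--     for d in range(depth):
--         op, n = ops[d % len(ops)]
--         if op == "+": val += n
--         elif op == "-": val -= n
--         elif op == "*": val *= n
--         expr = f"({expr}{op}{n})"
--     return expr, str(val)
-- ===== SOURCE B (Python) =====
-- def _nesting_probe(depth, trial=0):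
--     v0 = 3 + trial
--     n = max(depth, 0)
--     q, r = divmod(n, 7)
--     p = 6 ** q
--     # one full cycle of the 7 ops is the affine map v -> 6*v + 19; prefixes below
--     a, b = [(1, 0), (1, 2), (3, 6), (3, 5), (3, 9), (6, 18), (6, 16)][r]
--     val = a * (v0 * p + 19 * (p - 1) // 5) + b
--     toks = ["+2)", "*3)", "-1)", "+4)", "*2)", "-2)", "+3)"]
--     expr = "(" * n + str(v0) + "".join(toks[d % 7] for d in range(n))
--     return expr, str(val)
-- ===== Notes on version B (the rewrite author's own statement) =====
-- stated objective: faster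
-- what changed: B replaces the incremental wrap-and-update loop by a closed form: the 7-op cycle is the affine map v -> 6v+19, so the value is computed from 6**(n//7) plus a prefix table, and the expression string is assembled in one pass as '('*n + str(v0) + joined operator tokens instead of re-building the nested string each iteration.
import Mathlib
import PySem

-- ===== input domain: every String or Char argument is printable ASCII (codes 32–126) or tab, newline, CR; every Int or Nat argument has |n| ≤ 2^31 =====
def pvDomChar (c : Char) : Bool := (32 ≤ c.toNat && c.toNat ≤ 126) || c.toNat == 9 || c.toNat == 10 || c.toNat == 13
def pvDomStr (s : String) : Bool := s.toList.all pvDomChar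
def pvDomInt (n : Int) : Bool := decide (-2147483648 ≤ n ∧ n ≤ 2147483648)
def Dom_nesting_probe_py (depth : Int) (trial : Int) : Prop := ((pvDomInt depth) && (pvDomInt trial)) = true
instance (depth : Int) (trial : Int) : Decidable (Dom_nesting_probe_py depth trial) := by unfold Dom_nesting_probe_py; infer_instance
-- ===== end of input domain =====

-- B computes the value by a closed form (the 7-op cycle is v ↦ 6v+19) and the expression
-- string in one pass instead of A's nested rebuild; equivalence is proved on all inputs.

-- ===== PORT A =====
-- expr is carried as List Char (f-string concatenation done on the char list; String.mk at the end)
-- loop body of A: unpack ops[d % len(ops)], update val by the if/elif chain, wrap expr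
def pvOps : List (String × Int) := [("+", 2), ("*", 3), ("-", 1), ("+", 4), ("*", 2), ("-", 2), ("+", 3)]

def pvStep (s : List Char × Int) (d : Int) : List Char × Int :=
  let on := (PySem.List.pyGet? pvOps (PySem.Int.mod d (pvOps.length : Int))).getD ("+", 0)
  let v := if on.1 == "+" then s.2 + on.2
           else if on.1 == "-" then s.2 - on.2
           else if on.1 == "*" then s.2 * on.2
           else s.2
  ('(' :: s.1 ++ on.1.toList ++ PySem.Int.toChars on.2 ++ [')'], v)

def nesting_probe_py (depth : Int) (trial : Int) : String × String :=
  let val : Int := 3 + trial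
  let expr : List Char := PySem.Int.toChars val
  let res := (PySem.List.pyRange 0 depth 1).foldl pvStep (expr, val)
  (String.ofList res.1, PySem.Int.toStr res.2)

-- ===== PORT B =====
def nesting_probe_py_alt (depth : Int) (trial : Int) : String × String :=
  let v0 : Int := 3 + trial
  let n : Int := max depth 0
  let q : Int := PySem.Int.floordiv n 7
  let r : Int := PySem.Int.mod n 7
  let p : Int := 6 ^ q.toNat   -- 6 ** q; q ≥ 0 always, so the Nat exponent is exact
  let ab := (PySem.List.pyGet? ([(1, 0), (1, 2), (3, 6), (3, 5), (3, 9), (6, 18), (6, 16)] : List (Int × Int)) r).getD (0, 0)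
  let val : Int := ab.1 * (v0 * p + PySem.Int.floordiv (19 * (p - 1)) 5) + ab.2
  let toks : List (List Char) := ["+2)".toList, "*3)".toList, "-1)".toList, "+4)".toList, "*2)".toList, "-2)".toList, "+3)".toList]
  let expr : List Char := List.replicate n.toNat '(' ++ PySem.Int.toChars v0
      ++ ((PySem.List.pyRange 0 n 1).map (fun d => (PySem.List.pyGet? toks (PySem.Int.mod d 7)).getD [])).flatten
  (String.ofList expr, PySem.Int.toStr val)

-- ===== PRECONDITION & SPEC =====
def Spec_nesting_probe_py (depth : Int) (trial : Int) (out : String × String) : Prop := out = nesting_probe_py_alt depth trial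
instance (depth : Int) (trial : Int) (out : String × String) : Decidable (Spec_nesting_probe_py depth trial out) := by unfold Spec_nesting_probe_py; infer_instance

-- ===== CLAIM (what is proved, stated in full; the proofs are below) =====
def Claim_equal_nesting_probe_py : Prop := ∀ (depth : Int) (trial : Int), Dom_nesting_probe_py depth trial → Spec_nesting_probe_py depth trial (nesting_probe_py depth trial)

-- ===== LEMMAS AND PROOFS =====

-- token of step k (the "{op}{n})" suffix A appends at step k)
def pvTok (k : Nat) : List Char :=
  (["+2)".toList, "*3)".toList, "-1)".toList, "+4)".toList, "*2)".toList, "-2)".toList, "+3)".toList]).getD (k % 7) []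

-- value update of step k
def pvVStep (k : Nat) (v : Int) : Int :=
  match k % 7 with
  | 0 => v + 2 | 1 => v * 3 | 2 => v - 1 | 3 => v + 4 | 4 => v * 2 | 5 => v - 2 | _ => v + 3

def pvVRun (m : Nat) (v : Int) : Int :=
  match m with
  | 0 => v
  | m + 1 => pvVStep m (pvVRun m v)

-- (6^q - 1) / 5 as an exact integer
def pvG (q : Nat) : Int :=
  match q with
  | 0 => 0
  | q + 1 => 6 * pvG q + 1

def pvAB (r : Nat) : Int × Int :=
  ([(1, 0), (1, 2), (3, 6), (3, 5), (3, 9), (6, 18), (6, 16)] : List (Int × Int)).getD r (0, 0)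

def pvCF (m : Nat) (v : Int) : Int :=
  (pvAB (m % 7)).1 * (v * 6 ^ (m / 7) + 19 * pvG (m / 7)) + (pvAB (m % 7)).2

theorem pvPow6 (q : Nat) : (6 : Int) ^ q = 5 * pvG q + 1 := by
  induction q with
  | zero => simp [pvG]
  | succ q ih => rw [pow_succ, ih, pvG]; ring

theorem pvVStep_add7 (m : Nat) (v : Int) : pvVStep (m + 7) v = pvVStep m v := by
  simp [pvVStep, Nat.add_mod_right]

theorem pvVRun_shift (m : Nat) (v : Int) : pvVRun (m + 7) v = pvVRun m (6 * v + 19) := by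
  induction m with
  | zero => simp [pvVRun, pvVStep]; ring
  | succ m ih =>
      show pvVStep (m + 7) (pvVRun (m + 7) v) = pvVStep m (pvVRun m (6 * v + 19))
      rw [pvVStep_add7, ih]

theorem pvVRun_cf (m : Nat) (v : Int) : pvVRun m v = pvCF m v := by
  induction m using Nat.strong_induction_on generalizing v with
  | _ m ih =>
    by_cases h : m < 7
    · interval_cases m <;> simp [pvVRun, pvVStep, pvCF, pvAB, pvG] <;> ring
    · obtain ⟨m', rfl⟩ : ∃ m', m = m' + 7 := ⟨m - 7, by omega⟩
      rw [pvVRun_shift, ih m' (by omega)]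
      have hq : (m' + 7) / 7 = m' / 7 + 1 := by omega
      have hr : (m' + 7) % 7 = m' % 7 := by omega
      simp only [pvCF, hq, hr, pvG, pow_succ]
      have := pvPow6 (m' / 7)
      linear_combination 19 * (pvAB (m' % 7)).1 * this

-- expression accumulator
def pvERun (m : Nat) (e : List Char) : List Char :=
  match m with
  | 0 => e
  | m + 1 => '(' :: pvERun m e ++ pvTok m

theorem pvERun_flat (m : Nat) (e : List Char) :
    pvERun m e = List.replicate m '(' ++ e ++ ((List.range m).map pvTok).flatten := by
  induction m with
  | zero => simp [pvERun]
  | succ m ih =>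
      rw [pvERun, ih, List.range_succ]
      simp [List.replicate_succ]

-- one step of A's fold at index ↑k equals (estep, vstep)
theorem pvStepA (k : Nat) (e : List Char) (v : Int) :
    pvStep (e, v) (k : Int) = ('(' :: e ++ pvTok k, pvVStep k v) := by
  have h7 : PySem.Int.mod (k : Int) ((pvOps.length : Nat) : Int) = ((k % 7 : Nat) : Int) := by
    exact_mod_cast PySem.Int.mod_natCast k pvOps.length
  have hk : k % 7 < 7 := Nat.mod_lt _ (by norm_num)
  simp only [pvStep, h7]
  interval_cases h : k % 7 <;>
    simp [PySem.List.pyGet?, PySem.List.pyIdx?, pvOps, pvTok, pvVStep, h, PySem.Int.toChars] <;> rfl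

theorem pvFoldA (m : Nat) (e : List Char) (v : Int) :
    (PySem.List.pyRange 0 (m : Int) 1).foldl pvStep (e, v) = (pvERun m e, pvVRun m v) := by
  induction m with
  | zero => simp [PySem.List.pyRange_one_eq_nil, pvERun, pvVRun]
  | succ m ih =>
      have hsplit : PySem.List.pyRange 0 ((m : Int) + 1) 1
          = PySem.List.pyRange 0 (m : Int) 1 ++ [(m : Int)] :=
        PySem.List.pyRange_one_succ_right (by positivity)
      have hc : ((m + 1 : Nat) : Int) = (m : Int) + 1 := by push_cast; ring
      rw [hc, hsplit, List.foldl_append, ih, List.foldl_cons, List.foldl_nil]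
      exact pvStepA m (pvERun m e) (pvVRun m v)

-- B's per-index token equals pvTok
theorem pvTokB (k : Nat) :
    (PySem.List.pyGet? (["+2)".toList, "*3)".toList, "-1)".toList, "+4)".toList, "*2)".toList, "-2)".toList, "+3)".toList]
      : List (List Char)) (PySem.Int.mod (k : Int) 7)).getD [] = pvTok k := by
  have h7 : PySem.Int.mod (k : Int) (7 : Int) = ((k % 7 : Nat) : Int) := by
    exact_mod_cast PySem.Int.mod_natCast k 7
  have hk : k % 7 < 7 := Nat.mod_lt _ (by norm_num)
  simp only [h7]
  interval_cases h : k % 7 <;> simp [PySem.List.pyGet?, PySem.List.pyIdx?, pvTok, h]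

-- ===== VERDICT (by name: the statement is the Claim_ definition above) =====
theorem nesting_probe_py_spec : Claim_equal_nesting_probe_py := by
  intro depth trial _
  unfold Spec_nesting_probe_py nesting_probe_py nesting_probe_py_alt
  set m : Nat := depth.toNat with hm
  have hrange : PySem.List.pyRange 0 depth 1 = PySem.List.pyRange 0 (m : Int) 1 := by
    by_cases h : depth ≤ 0
    · rw [PySem.List.pyRange_one_eq_nil h, PySem.List.pyRange_one_eq_nil (by omega)]
    · congr 1; omega
  have hmax : max depth 0 = (m : Int) := by omega
  simp only [hrange, hmax]
  rw [pvFoldA]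
  have hq : PySem.Int.floordiv (m : Int) 7 = ((m / 7 : Nat) : Int) := by
    exact_mod_cast PySem.Int.floordiv_natCast m 7
  have hr : PySem.Int.mod (m : Int) 7 = ((m % 7 : Nat) : Int) := by
    exact_mod_cast PySem.Int.mod_natCast m 7
  have habs : ((PySem.List.pyGet? ([(1, 0), (1, 2), (3, 6), (3, 5), (3, 9), (6, 18), (6, 16)] : List (Int × Int))
      ((m % 7 : Nat) : Int)).getD (0, 0)) = pvAB (m % 7) := by
    have hk : m % 7 < 7 := Nat.mod_lt _ (by norm_num)
    interval_cases h : m % 7 <;> simp [PySem.List.pyGet?, PySem.List.pyIdx?, pvAB]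
  have hdiv : PySem.Int.floordiv (19 * ((6 : Int) ^ (m / 7) - 1)) 5 = 19 * pvG (m / 7) := by
    rw [pvPow6]
    have h5 : (19 : Int) * (5 * pvG (m / 7) + 1 - 1) = 19 * pvG (m / 7) * 5 := by ring
    rw [h5, PySem.Int.floordiv_eq_ediv_of_pos (by norm_num)]
    exact Int.mul_ediv_cancel _ (by norm_num)
  simp only [hq, hr, habs, Int.toNat_natCast, hdiv]
  have hexpr : pvERun m (PySem.Int.toChars (3 + trial))
      = List.replicate m '(' ++ PySem.Int.toChars (3 + trial)
        ++ ((PySem.List.pyRange 0 (m : Int) 1).map (fun d =>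
              (PySem.List.pyGet? (["+2)".toList, "*3)".toList, "-1)".toList, "+4)".toList, "*2)".toList, "-2)".toList, "+3)".toList]
                : List (List Char)) (PySem.Int.mod d 7)).getD [])).flatten := by
    rw [pvERun_flat, PySem.List.pyRange_one 0 (m : Int)]
    have h0 : (((m : Int)) - 0).toNat = m := by omega
    rw [h0, List.map_map]
    congr 2
    refine List.map_congr_left (fun k hk => ?_)
    simpa using (pvTokB k).symm
  have hval : pvVRun m (3 + trial)
      = (pvAB (m % 7)).1 * ((3 + trial) * 6 ^ (m / 7) + 19 * pvG (m / 7)) + (pvAB (m % 7)).2 := by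
    rw [pvVRun_cf]; rfl
  rw [hexpr, hval]
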